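-- pv_equiv track=rewrite | github.com/821125/python | hw_05.py | s_hex
-- ===== SOURCE A (Python) =====
-- from collections import deque
--
-- hex_num = {'0': 0, '1': 1, '2': 2, '3': 3, '4': 4, '5': 5, '6': 6, '7': 7, '8': 8, '9': 9,
--            'A': 10, 'B': 11, 'C': 12, 'D': 13, 'E': 14, 'F': 15,
--            0: '0', 1: '1', 2: '2', 3: '3', 4: '4', 5: '5', 6: '6', 7: '7', 8: '8', 9: '9',
--            10: 'A', 11: 'B', 12: 'C', 13: 'D', 14: 'E', 15: 'F'}
--
-- def s_hex(x, y):
--     result = deque()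
--     transfer = 0
--
--     x, y = (deque(y), deque(x)) if len(y) > len(x) else (deque(x), deque(y))
--     while x:
--         if y:
--             res = hex_num[x.pop()] + hex_num[y.pop()] + transfer
--         else:
--             res = hex_num[x.pop()] + transfer
--         transfer = 0
--         if res < 16:
--             result.appendleft(hex_num[res])
--         else:
--             result.appendleft(hex_num[res - 16])
--             transfer = 1
--     if transfer:
--         result.appendleft('1')
--
--     return list(result)
-- ===== SOURCE B (Python) =====
-- hex_num = {'0': 0, '1': 1, '2': 2, '3': 3, '4': 4, '5': 5, '6': 6, '7': 7, '8': 8, '9': 9,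
--            'A': 10, 'B': 11, 'C': 12, 'D': 13, 'E': 14, 'F': 15,
--            0: '0', 1: '1', 2: '2', 3: '3', 4: '4', 5: '5', 6: '6', 7: '7', 8: '8', 9: '9',
--            10: 'A', 11: 'B', 12: 'C', 13: 'D', 14: 'E', 15: 'F'}
--
-- def s_hex(x, y):
--     # Horner-convert both digit lists to integers, add, then re-digitize the sum.
--     vx = 0
--     for d in x:
--         vx = vx * 16 + hex_num[d]
--     vy = 0
--     for d in y:
--         vy = vy * 16 + hex_num[d]
--     total = vx + vy
--     digits = []
--     while total:
--         total, r = divmod(total, 16)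
--         digits.append(hex_num[r])
--     digits += ['0'] * (max(len(x), len(y)) - len(digits))
--     return digits[::-1]
-- ===== Notes on version B (the rewrite author's own statement) =====
-- stated objective: alternative
-- what changed: A interleaves a right-to-left pop/carry loop over both deques; B converts each digit list to an integer by Horner's rule, adds once, and re-digitizes the sum with repeated divmod, padding with '0' to max(len(x), len(y)).
import Mathlib
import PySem

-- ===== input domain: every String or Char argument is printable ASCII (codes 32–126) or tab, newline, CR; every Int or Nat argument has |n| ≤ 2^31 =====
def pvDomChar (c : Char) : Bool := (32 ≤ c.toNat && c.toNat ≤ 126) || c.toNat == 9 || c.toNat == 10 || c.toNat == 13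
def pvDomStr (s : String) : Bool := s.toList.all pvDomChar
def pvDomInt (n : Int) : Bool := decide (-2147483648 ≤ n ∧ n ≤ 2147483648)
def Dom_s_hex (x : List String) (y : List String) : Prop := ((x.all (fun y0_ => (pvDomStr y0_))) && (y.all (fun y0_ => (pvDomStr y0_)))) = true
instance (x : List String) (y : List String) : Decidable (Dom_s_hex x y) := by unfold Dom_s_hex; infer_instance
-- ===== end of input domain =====

-- B replaces A's interleaved pop/carry loop by two Horner conversions to an integer, one addition,
-- and a divmod re-digitization padded to max input length (objective: alternative decomposition).

-- ===== PORT A =====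
-- Python's hex_num mixes str and int keys; the port splits it into the two typed halves A uses.
def hexDictSI : PySem.Dict String Int :=
  PySem.Dict.ofList [("0", 0), ("1", 1), ("2", 2), ("3", 3), ("4", 4), ("5", 5), ("6", 6), ("7", 7),
                     ("8", 8), ("9", 9), ("A", 10), ("B", 11), ("C", 12), ("D", 13), ("E", 14), ("F", 15)]

def hexDictIS : PySem.Dict Int String :=
  PySem.Dict.ofList [(0, "0"), (1, "1"), (2, "2"), (3, "3"), (4, "4"), (5, "5"), (6, "6"), (7, "7"),
                     (8, "8"), (9, "9"), (10, "A"), (11, "B"), (12, "C"), (13, "D"), (14, "E"), (15, "F")]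

-- hex_num[s] for a string key; KeyError inputs are excluded by Pre_s_hex, the default is never read there
def hexA (s : String) : Int := hexDictSI.getD s 0
def chrA (i : Int) : String := hexDictIS.getD i ""

-- the while loop; x is popped from the right, so the loop consumes the reversed deques head-first
def loopA : List String → List String → Int → List String → List String
  | [], _, transfer, result => if transfer ≠ 0 then "1" :: result else result
  | xc :: xr, yr, transfer, result =>
    match yr with
    | yc :: yr' =>
      let res := hexA xc + hexA yc + transfer
      if res < 16 then loopA xr yr' 0 (chrA res :: result)
      else loopA xr yr' 1 (chrA (res - 16) :: result)
    | [] =>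
      let res := hexA xc + transfer
      if res < 16 then loopA xr [] 0 (chrA res :: result)
      else loopA xr [] 1 (chrA (res - 16) :: result)

def s_hex (x : List String) (y : List String) : List String :=
  let p := if y.length > x.length then (y, x) else (x, y)
  loopA p.1.reverse p.2.reverse 0 []

-- ===== PORT B =====
-- B's integer values are nonnegative throughout, so they are carried as Nat
-- (Python divmod(n, 16) on n ≥ 0 is exactly Nat division/remainder).
def hexDictSN : PySem.Dict String Nat :=
  PySem.Dict.ofList [("0", 0), ("1", 1), ("2", 2), ("3", 3), ("4", 4), ("5", 5), ("6", 6), ("7", 7),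
                     ("8", 8), ("9", 9), ("A", 10), ("B", 11), ("C", 12), ("D", 13), ("E", 14), ("F", 15)]

def hexDictNS : PySem.Dict Nat String :=
  PySem.Dict.ofList [(0, "0"), (1, "1"), (2, "2"), (3, "3"), (4, "4"), (5, "5"), (6, "6"), (7, "7"),
                     (8, "8"), (9, "9"), (10, "A"), (11, "B"), (12, "C"), (13, "D"), (14, "E"), (15, "F")]

def hexB (s : String) : Nat := hexDictSN.getD s 0
def chrB (n : Nat) : String := hexDictNS.getD n ""

-- the `while total:` divmod loop, least-significant digit first
def toDigits (n : Nat) : List String :=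
  if h : n = 0 then [] else chrB (n % 16) :: toDigits (n / 16)
  decreasing_by exact Nat.div_lt_self (Nat.pos_of_ne_zero h) (by norm_num)

def s_hex_alt (x : List String) (y : List String) : List String :=
  let vx := x.foldl (fun v d => v * 16 + hexB d) 0
  let vy := y.foldl (fun v d => v * 16 + hexB d) 0
  let total := vx + vy
  let ds := toDigits total
  let ds := ds ++ List.replicate (max x.length y.length - ds.length) "0"
  ds.reverse

-- ===== PRECONDITION & SPEC =====
-- Pre_ excludes exactly the inputs holding a string that is not an upper-case hex digit:
-- there both the Python A and the Python B raise KeyError on the hex_num lookup.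
def hexDigits : List String :=
  ["0", "1", "2", "3", "4", "5", "6", "7", "8", "9", "A", "B", "C", "D", "E", "F"]

def Pre_s_hex (x : List String) (y : List String) : Prop :=
  (∀ s ∈ x, s ∈ hexDigits) ∧ (∀ s ∈ y, s ∈ hexDigits)
instance (x : List String) (y : List String) : Decidable (Pre_s_hex x y) := by
  unfold Pre_s_hex; infer_instance

def pvWitness_s_hex : List String × List String := (["1", "A"], ["F"])

def Spec_s_hex (x : List String) (y : List String) (out : List String) : Prop := out = s_hex_alt x y
instance (x : List String) (y : List String) (out : List String) : Decidable (Spec_s_hex x y out) := by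
  unfold Spec_s_hex; infer_instance

-- ===== CLAIM (what is proved, stated in full; the proofs are below) =====
def Claim_equal_s_hex : Prop :=
  ∀ (x : List String) (y : List String), Dom_s_hex x y → Pre_s_hex x y → Spec_s_hex x y (s_hex x y)

-- ===== LEMMAS AND PROOFS =====

-- value of a least-significant-first digit list
def nrev : List String → Nat
  | [] => 0
  | d :: r => hexB d + 16 * nrev r

-- the common target: most-significant-first digits of n % 16^w padded to width w, "1" in front on overflow
def msd : Nat → Nat → List String
  | _, 0 => []
  | n, w + 1 => msd (n / 16) w ++ [chrB (n % 16)]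

def digitsRepr (n w : Nat) : List String :=
  (if 16 ^ w ≤ n then ["1"] else []) ++ msd (n % 16 ^ w) w

theorem hexA_eq (s : String) (h : s ∈ hexDigits) : hexA s = ((hexB s : Nat) : Int) := by
  fin_cases h <;> decide

theorem hexB_lt (s : String) (h : s ∈ hexDigits) : hexB s < 16 := by
  fin_cases h <;> decide

theorem chrA_eq (n : Nat) (h : n < 16) : chrA (n : Int) = chrB n := by
  interval_cases n <;> decide

theorem nrev_lt (l : List String) (hv : ∀ s ∈ l, s ∈ hexDigits) : nrev l < 16 ^ l.length := by
  induction l with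
  | nil => simp [nrev]
  | cons d r ih =>
    have h1 := hexB_lt d (hv d (List.mem_cons_self))
    have h2 := ih (fun s hs => hv s (List.mem_cons_of_mem _ hs))
    simp only [nrev, List.length_cons, pow_succ]
    omega

theorem nrev_append (a b : List String) :
    nrev (a ++ b) = nrev a + 16 ^ a.length * nrev b := by
  induction a with
  | nil => simp [nrev]
  | cons d r ih => simp only [List.cons_append, nrev, ih, List.length_cons, pow_succ]; ring

theorem foldl_horner (l : List String) (a : Nat) :
    l.foldl (fun v d => v * 16 + hexB d) a = a * 16 ^ l.length + nrev l.reverse := by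
  induction l generalizing a with
  | nil => simp [nrev]
  | cons d r ih =>
    simp only [List.foldl_cons, ih, List.reverse_cons, nrev_append, List.length_reverse,
      List.length_cons, nrev, pow_succ]
    ring

theorem digitsRepr_step (r m w : Nat) (hr : r < 16) :
    digitsRepr (r + 16 * m) (w + 1) = digitsRepr m w ++ [chrB r] := by
  have hp : 0 < 16 ^ w := by positivity
  obtain ⟨q, s, hslt, rfl⟩ : ∃ q s, s < 16 ^ w ∧ m = 16 ^ w * q + s :=
    ⟨m / 16 ^ w, m % 16 ^ w, Nat.mod_lt _ hp, (Nat.div_add_mod m (16 ^ w)).symm⟩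
  have hcond : (16 ^ (w + 1) ≤ r + 16 * (16 ^ w * q + s)) ↔ (16 ^ w ≤ 16 ^ w * q + s) := by
    rw [pow_succ]
    rcases Nat.eq_zero_or_pos q with h | h
    · subst h; simp only [Nat.mul_zero, Nat.zero_add]; omega
    · have := Nat.le_mul_of_pos_right (16 ^ w) h
      constructor <;> intro <;> omega
  have hmod : (r + 16 * (16 ^ w * q + s)) % 16 ^ (w + 1) = r + 16 * s := by
    rw [pow_succ]
    have h1 : r + 16 * (16 ^ w * q + s) = (r + 16 * s) + (16 ^ w * 16) * q := by ring
    rw [h1, Nat.add_mul_mod_self_left, Nat.mod_eq_of_lt (by omega)]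
  have hmods : (16 ^ w * q + s) % 16 ^ w = s := by
    have h1 : 16 ^ w * q + s = s + 16 ^ w * q := by ring
    rw [h1, Nat.add_mul_mod_self_left, Nat.mod_eq_of_lt hslt]
  have hmsd : msd (r + 16 * s) (w + 1) = msd s w ++ [chrB r] := by
    have h2 : (r + 16 * s) / 16 = s := by omega
    have h3 : (r + 16 * s) % 16 = r := by omega
    simp [msd, h2, h3]
  simp only [digitsRepr, hcond, hmod, hmods, hmsd]
  rw [List.append_assoc]

theorem loopA_repr (xr : List String) : ∀ (yr : List String) (t : Nat) (acc : List String),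
    (∀ s ∈ xr, s ∈ hexDigits) → (∀ s ∈ yr, s ∈ hexDigits) →
    yr.length ≤ xr.length → t ≤ 1 →
    loopA xr yr (t : Nat) acc = digitsRepr (nrev xr + nrev yr + t) xr.length ++ acc := by
  induction xr with
  | nil =>
    intro yr t acc _ _ hlen ht
    have : yr = [] := List.eq_nil_of_length_eq_zero (Nat.le_zero.mp hlen)
    subst this
    interval_cases t <;> simp [loopA, digitsRepr, msd, nrev]
  | cons xc xr ih =>
    intro yr t acc hx hy hlen ht
    have hxc : xc ∈ hexDigits := hx xc List.mem_cons_self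
    have hx' : ∀ s ∈ xr, s ∈ hexDigits := fun s hs => hx s (List.mem_cons_of_mem _ hs)
    have hdx := hexB_lt xc hxc
    match yr with
    | yc :: yr' =>
      have hyc : yc ∈ hexDigits := hy yc List.mem_cons_self
      have hy' : ∀ s ∈ yr', s ∈ hexDigits := fun s hs => hy s (List.mem_cons_of_mem _ hs)
      have hdy := hexB_lt yc hyc
      have hlen' : yr'.length ≤ xr.length := by simpa using hlen
      show (if hexA xc + hexA yc + (t : Int) < 16 then
              loopA xr yr' 0 (chrA (hexA xc + hexA yc + (t : Int)) :: acc)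
            else loopA xr yr' 1 (chrA (hexA xc + hexA yc + (t : Int) - 16) :: acc)) = _
      rw [hexA_eq xc hxc, hexA_eq yc hyc]
      have harg : ((hexB xc : Int) + (hexB yc : Int) + (t : Int)) = ((hexB xc + hexB yc + t : Nat) : Int) := by
        push_cast; ring
      set S := hexB xc + hexB yc + t with hS
      rw [harg]
      by_cases hlt : S < 16
      · rw [if_pos (by exact_mod_cast hlt), chrA_eq S hlt,
          show (0 : Int) = ((0 : Nat) : Int) from rfl, ih yr' 0 _ hx' hy' hlen' (by omega)]
        have he : nrev (xc :: xr) + nrev (yc :: yr') + t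
            = S + 16 * (nrev xr + nrev yr' + 0) := by simp only [nrev, hS]; ring
        rw [he, List.length_cons, digitsRepr_step _ _ _ hlt, List.append_assoc, List.singleton_append]
      · rw [if_neg (by exact_mod_cast hlt)]
        have h16 : 16 ≤ S := by omega
        have harg2 : ((S : Nat) : Int) - 16 = ((S - 16 : Nat) : Int) := by omega
        rw [harg2, chrA_eq (S - 16) (by omega),
          show (1 : Int) = ((1 : Nat) : Int) from rfl, ih yr' 1 _ hx' hy' hlen' (by omega)]
        have he : nrev (xc :: xr) + nrev (yc :: yr') + t
            = (S - 16) + 16 * (nrev xr + nrev yr' + 1) := by simp only [nrev, hS]; omega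
        rw [he, List.length_cons, digitsRepr_step _ _ _ (by omega), List.append_assoc, List.singleton_append]
    | [] =>
      show (if hexA xc + (t : Int) < 16 then
              loopA xr [] 0 (chrA (hexA xc + (t : Int)) :: acc)
            else loopA xr [] 1 (chrA (hexA xc + (t : Int) - 16) :: acc)) = _
      rw [hexA_eq xc hxc]
      have harg : ((hexB xc : Int) + (t : Int)) = ((hexB xc + t : Nat) : Int) := by push_cast; ring
      set S := hexB xc + t with hS
      rw [harg]
      by_cases hlt : S < 16
      · rw [if_pos (by exact_mod_cast hlt), chrA_eq S hlt,
          show (0 : Int) = ((0 : Nat) : Int) from rfl,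
          ih [] 0 _ hx' (by simp) (by simp) (by omega)]
        have he : nrev (xc :: xr) + nrev [] + t = S + 16 * (nrev xr + nrev [] + 0) := by
          simp only [nrev, hS]; ring
        rw [he, List.length_cons, digitsRepr_step _ _ _ hlt, List.append_assoc, List.singleton_append]
      · rw [if_neg (by exact_mod_cast hlt)]
        have harg2 : ((S : Nat) : Int) - 16 = ((S - 16 : Nat) : Int) := by omega
        rw [harg2, chrA_eq (S - 16) (by omega),
          show (1 : Int) = ((1 : Nat) : Int) from rfl,
          ih [] 1 _ hx' (by simp) (by simp) (by omega)]
        have he : nrev (xc :: xr) + nrev [] + t = (S - 16) + 16 * (nrev xr + nrev [] + 1) := by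
          simp only [nrev, hS]; omega
        rw [he, List.length_cons, digitsRepr_step _ _ _ (by omega), List.append_assoc, List.singleton_append]

theorem toDigits_zero : toDigits 0 = [] := by
  rw [toDigits]
  rfl

theorem toDigits_pos (n : Nat) (h : n ≠ 0) :
    toDigits n = chrB (n % 16) :: toDigits (n / 16) := by
  rw [toDigits]
  simp [h]

theorem msd_zero (w : Nat) : msd 0 w = List.replicate w "0" := by
  induction w with
  | zero => rfl
  | succ w ih =>
    have hc : chrB 0 = "0" := by decide
    simp only [msd, Nat.zero_div, Nat.zero_mod, ih, hc]
    rw [← List.replicate_succ']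

theorem toDigits_repr (w : Nat) : ∀ n, n < 2 * 16 ^ w →
    (toDigits n ++ List.replicate (w - (toDigits n).length) "0").reverse = digitsRepr n w := by
  induction w with
  | zero =>
    intro n hn
    interval_cases n
    · simp [toDigits_zero, digitsRepr, msd]
    · rw [toDigits_pos 1 (by norm_num)]
      norm_num [toDigits_zero, digitsRepr, msd]
      decide
  | succ w ih =>
    intro n hn
    by_cases h0 : n = 0
    · subst h0
      have hpos : 0 < 16 ^ (w + 1) := by positivity
      simp [toDigits_zero, digitsRepr, msd_zero, Nat.not_le.mpr hpos, List.reverse_replicate]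
    · rw [toDigits_pos n h0]
      have hdiv : n / 16 < 2 * 16 ^ w := by
        rw [Nat.div_lt_iff_lt_mul (by norm_num)]
        calc n < 2 * 16 ^ (w + 1) := hn
        _ = 2 * 16 ^ w * 16 := by ring
      have hlen : w + 1 - (chrB (n % 16) :: toDigits (n / 16)).length
          = w - (toDigits (n / 16)).length := by simp
      rw [hlen, List.cons_append, List.reverse_cons, ih _ hdiv]
      have hsplit : digitsRepr n (w + 1) = digitsRepr (n % 16 + 16 * (n / 16)) (w + 1) := by
        congr 1
        omega
      rw [hsplit, digitsRepr_step _ _ _ (Nat.mod_lt _ (by norm_num))]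

theorem s_hex_alt_eq_repr (x y : List String)
    (hx : ∀ s ∈ x, s ∈ hexDigits) (hy : ∀ s ∈ y, s ∈ hexDigits) :
    s_hex_alt x y = digitsRepr (nrev x.reverse + nrev y.reverse) (max x.length y.length) := by
  have hxb := nrev_lt x.reverse (fun s hs => hx s (List.mem_reverse.mp hs))
  have hyb := nrev_lt y.reverse (fun s hs => hy s (List.mem_reverse.mp hs))
  simp only [List.length_reverse] at hxb hyb
  have hbound : nrev x.reverse + nrev y.reverse < 2 * 16 ^ max x.length y.length := by
    have h1 : (16 : Nat) ^ x.length ≤ 16 ^ max x.length y.length :=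
      Nat.pow_le_pow_right (by norm_num) (le_max_left _ _)
    have h2 : (16 : Nat) ^ y.length ≤ 16 ^ max x.length y.length :=
      Nat.pow_le_pow_right (by norm_num) (le_max_right _ _)
    omega
  simp only [s_hex_alt, foldl_horner, zero_mul, zero_add]
  exact toDigits_repr _ _ hbound

-- ===== VERDICT (by name: the statement is the Claim_ definition above) =====
theorem s_hex_spec : Claim_equal_s_hex := by
  intro x y _ hpre
  obtain ⟨hx, hy⟩ := hpre
  unfold Spec_s_hex
  rw [s_hex_alt_eq_repr x y hx hy]
  unfold s_hex
  by_cases hgt : y.length > x.length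
  · simp only [hgt, if_true]
    have := loopA_repr y.reverse x.reverse 0 []
      (fun s hs => hy s (List.mem_reverse.mp hs)) (fun s hs => hx s (List.mem_reverse.mp hs))
      (by simpa using le_of_lt hgt) (by omega)
    simp only [Nat.cast_zero, Nat.add_zero, List.append_nil, List.length_reverse] at this
    rw [this, Nat.add_comm (nrev y.reverse), Nat.max_eq_right (le_of_lt hgt)]
  · simp only [hgt, if_false]
    have := loopA_repr x.reverse y.reverse 0 []
      (fun s hs => hx s (List.mem_reverse.mp hs)) (fun s hs => hy s (List.mem_reverse.mp hs))
      (by simpa using Nat.le_of_not_lt hgt) (by omega)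
    simp only [Nat.cast_zero, Nat.add_zero, List.append_nil, List.length_reverse] at this
    rw [this, Nat.max_eq_left (Nat.le_of_not_lt hgt)]
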